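-- pv_equiv track=rewrite | github.com/kyrosk/chatbot | cw1.py | pronouncing
-- ===== SOURCE A (Python) =====
-- def pronouncing(username):
-- 	p = username.split()
--
-- 	if('You can call me' in username):
-- 		for i in p:
-- 			if(i!='You' and i!='can' and i!='call'and i!='me'):
-- 				return i
--
-- 	elif('My name is' in username):
-- 		for i in p:
-- 			if(i!='My' and i!='name' and i!='is'):
-- 				return i
--
-- 	elif('My people call me' in username):
-- 		for i in p:
-- 			if(i!='My' and i!='people' and i!='call'and i!='me'):
-- 				return i
--
-- 	elif('is' in username):
-- 		for i in p:
-- 			if(i!='is'):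
-- 				return i
--
-- 	elif('Please now call me' in username):
-- 		for i in p:
-- 			if(i!='Please' and i!='now' and i!='call'and i!='me'):
-- 				return i
--
-- 	elif('Change my name to' in username):
-- 		for i in p:
-- 			if(i!='Change' and i!='my' and i!='name'and i!='to'):
-- 				return i
--
-- 	else:
-- 		return username
-- ===== SOURCE B (Python) =====
-- # Key observation: each branch's stopword set is exactly the words of its trigger
-- # phrase, so no hand-written sets or branches are needed at all.
-- PHRASES = ['You can call me', 'My name is', 'My people call me',
--            'is', 'Please now call me', 'Change my name to']
--
-- def pronouncing(username):
--     def first_non(words, stops):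
--         if not words:
--             return None
--         return words[0] if words[0] not in stops else first_non(words[1:], stops)
--
--     def match(phrases):
--         if not phrases:
--             return username
--         ph = phrases[0]
--         if ph in username:
--             return first_non(username.split(), ph.split())
--         return match(phrases[1:])
--
--     return match(PHRASES)
-- ===== Notes on version B (the rewrite author's own statement) =====
-- stated objective: simpler
-- what changed: B exploits that each branch's stopword set is exactly the words of its own trigger phrase: a recursive matcher walks the phrase list, and on the first phrase contained in username recursively scans the split words for the first one not among the phrase's own split words, eliminating all six branches and all hand-written sets.
import Mathlib
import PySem

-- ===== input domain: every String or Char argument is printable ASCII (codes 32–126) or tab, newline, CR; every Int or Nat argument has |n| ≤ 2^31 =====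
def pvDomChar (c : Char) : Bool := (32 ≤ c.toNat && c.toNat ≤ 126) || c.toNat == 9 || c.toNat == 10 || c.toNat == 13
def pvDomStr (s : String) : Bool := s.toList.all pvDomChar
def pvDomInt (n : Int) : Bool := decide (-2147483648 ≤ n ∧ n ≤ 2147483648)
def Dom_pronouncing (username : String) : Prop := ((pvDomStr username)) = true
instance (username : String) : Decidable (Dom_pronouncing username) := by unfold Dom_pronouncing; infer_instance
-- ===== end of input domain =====

-- B drops A's six copy-pasted branches: each stopword set is exactly the split of its own
-- trigger phrase, so a recursive matcher over the phrase list suffices (objective: simpler).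

-- ===== PORT A =====
def pronouncing (username : String) : Option String :=
  let p := PySem.Str.split₀ username
  if PySem.Str.isIn "You can call me" username then
    p.find? (fun i => decide (i ≠ "You") && decide (i ≠ "can") && decide (i ≠ "call") && decide (i ≠ "me"))
  else if PySem.Str.isIn "My name is" username then
    p.find? (fun i => decide (i ≠ "My") && decide (i ≠ "name") && decide (i ≠ "is"))
  else if PySem.Str.isIn "My people call me" username then
    p.find? (fun i => decide (i ≠ "My") && decide (i ≠ "people") && decide (i ≠ "call") && decide (i ≠ "me"))
  else if PySem.Str.isIn "is" username then
    p.find? (fun i => decide (i ≠ "is"))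
  else if PySem.Str.isIn "Please now call me" username then
    p.find? (fun i => decide (i ≠ "Please") && decide (i ≠ "now") && decide (i ≠ "call") && decide (i ≠ "me"))
  else if PySem.Str.isIn "Change my name to" username then
    p.find? (fun i => decide (i ≠ "Change") && decide (i ≠ "my") && decide (i ≠ "name") && decide (i ≠ "to"))
  else
    some username

-- ===== PORT B =====
def pvPhrasesB : List String :=
  ["You can call me", "My name is", "My people call me", "is", "Please now call me", "Change my name to"]

def pvFirstNonB : List String → List String → Option String
  | [], _ => none
  | w :: ws, stops => if w ∈ stops then pvFirstNonB ws stops else some w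

def pvMatchB (username : String) : List String → Option String
  | [] => some username
  | ph :: rest =>
    if PySem.Str.isIn ph username then
      pvFirstNonB (PySem.Str.split₀ username) (PySem.Str.split₀ ph)
    else
      pvMatchB username rest

def pronouncing_alt (username : String) : Option String :=
  pvMatchB username pvPhrasesB

-- ===== PRECONDITION & SPEC =====
def Spec_pronouncing (username : String) (out : Option String) : Prop := out = pronouncing_alt username
instance (username : String) (out : Option String) : Decidable (Spec_pronouncing username out) := by unfold Spec_pronouncing; infer_instance

-- ===== CLAIM (what is proved, stated in full; the proofs are below) =====
def Claim_equal_pronouncing : Prop := ∀ (username : String), Dom_pronouncing username → Spec_pronouncing username (pronouncing username)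

-- ===== LEMMAS AND PROOFS =====

-- B's recursive scan equals List.find? with the negated-membership predicate.
theorem pvFirstNonB_eq_find? (l stops : List String) :
    pvFirstNonB l stops = l.find? (fun w => !(decide (w ∈ stops))) := by
  induction l with
  | nil => rfl
  | cons w ws ih =>
    by_cases h : w ∈ stops <;> simp [pvFirstNonB, List.find?, h, ih]

-- ===== VERDICT (by name: the statement is the Claim_ definition above) =====
theorem pronouncing_spec : Claim_equal_pronouncing := by
  intro username _
  unfold Spec_pronouncing pronouncing pronouncing_alt pvPhrasesB
  simp only [pvMatchB, pvFirstNonB_eq_find?]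
  rw [show PySem.Str.split₀ "You can call me" = ["You", "can", "call", "me"] from by decide,
      show PySem.Str.split₀ "My name is" = ["My", "name", "is"] from by decide,
      show PySem.Str.split₀ "My people call me" = ["My", "people", "call", "me"] from by decide,
      show PySem.Str.split₀ "is" = ["is"] from by decide,
      show PySem.Str.split₀ "Please now call me" = ["Please", "now", "call", "me"] from by decide,
      show PySem.Str.split₀ "Change my name to" = ["Change", "my", "name", "to"] from by decide]
  split_ifs <;> simp_all <;>
    · congr 1
      funext w
      simp [Bool.and_assoc]
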